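-- pv_equiv track=rewrite | github.com/zoomlogo/flax | flax/funcs.py | group_equal
-- ===== SOURCE A (Python) =====
-- def group_equal(x):
--     """group_equal: group equal adjacent elements"""
--     res = []
--     for i in x:
--         if res and res[-1][0] == i:
--             res[-1].append(i)
--         else:
--             res.append([i])
--     return res
-- ===== SOURCE B (Python) =====
-- def group_equal(x):
--     """group_equal: group equal adjacent elements (two-pointer run scanning + slicing)"""
--     res = []
--     i = 0
--     n = len(x)
--     while i < n:
--         j = i + 1
--         while j < n and x[j] == x[i]:
--             j += 1
--         res.append(x[i:j])
--         i = j
--     return res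
-- ===== Notes on version B (the rewrite author's own statement) =====
-- stated objective: alternative
-- what changed: B scans runs with a two-pointer loop and appends each run as one slice, instead of A's element-by-element fold that appends single items to the last group.
import Mathlib
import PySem

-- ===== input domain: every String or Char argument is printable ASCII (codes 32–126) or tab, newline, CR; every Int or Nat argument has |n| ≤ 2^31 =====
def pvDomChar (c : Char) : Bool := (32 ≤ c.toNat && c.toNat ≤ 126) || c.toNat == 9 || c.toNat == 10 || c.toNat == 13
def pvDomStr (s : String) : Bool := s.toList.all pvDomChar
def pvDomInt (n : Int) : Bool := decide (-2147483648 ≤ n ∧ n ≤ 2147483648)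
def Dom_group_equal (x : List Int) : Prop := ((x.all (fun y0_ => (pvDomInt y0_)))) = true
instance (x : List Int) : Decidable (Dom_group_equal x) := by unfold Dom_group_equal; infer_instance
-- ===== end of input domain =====

-- B groups equal adjacent elements by two-pointer run scanning (whole run appended at once)
-- instead of A's fold that appends single elements to the last group; return values are equal.

-- ===== PORT A =====
-- the body of A's for-loop: append i to the last group if its first element equals i, else start [i]
def pvStepA (res : List (List Int)) (i : Int) : List (List Int) :=
  match res.getLast? with
  | some g => if g.head? = some i then res.dropLast ++ [g ++ [i]] else res ++ [[i]]
  | none => res ++ [[i]]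

def group_equal (x : List Int) : List (List Int) :=
  x.foldl pvStepA []

-- ===== PORT B =====
-- two-pointer scan: inner while = takeWhile from position i; the slice x[i:j] is the run
def group_equal_alt (x : List Int) : List (List Int) :=
  match x with
  | [] => []
  | a :: t =>
      (a :: t.takeWhile (fun y => y == a)) :: group_equal_alt (t.dropWhile (fun y => y == a))
termination_by x.length
decreasing_by
  simp only [List.length_cons]
  exact Nat.lt_succ_of_le (List.length_dropWhile_le _ _)

-- ===== PRECONDITION & SPEC =====
def Spec_group_equal (x : List Int) (out : List (List Int)) : Prop := out = group_equal_alt x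
instance (x : List Int) (out : List (List Int)) : Decidable (Spec_group_equal x out) := by unfold Spec_group_equal; infer_instance

-- ===== CLAIM (what is proved, stated in full; the proofs are below) =====
def Claim_equal_group_equal : Prop := ∀ (x : List Int), Dom_group_equal x → Spec_group_equal x (group_equal x)

-- ===== LEMMAS AND PROOFS =====

lemma pv_tw_dw_append {p : Int → Bool} {t : List Int} (s : List Int)
    (h : t.dropWhile p ≠ []) :
    (t ++ s).takeWhile p = t.takeWhile p ∧ (t ++ s).dropWhile p = t.dropWhile p ++ s := by
  induction t with
  | nil => simp at h
  | cons a t ih =>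
    by_cases hp : p a = true
    · simp only [List.cons_append, List.takeWhile_cons, List.dropWhile_cons, hp, if_pos] at *
      obtain ⟨h1, h2⟩ := ih h
      simp [h1, h2]
    · simp only [Bool.not_eq_true] at hp
      simp [hp]

lemma pv_tw_of_dw_nil {p : Int → Bool} {t : List Int} (h : t.dropWhile p = []) :
    t.takeWhile p = t := by
  have := List.takeWhile_append_dropWhile (p := p) (l := t)
  rw [h, List.append_nil] at this
  exact this

lemma pv_tw_dw_append_all {p : Int → Bool} {t : List Int} (s : List Int)
    (h : t.dropWhile p = []) :
    (t ++ s).takeWhile p = t ++ s.takeWhile p ∧ (t ++ s).dropWhile p = s.dropWhile p := by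
  have htw := pv_tw_of_dw_nil h
  constructor
  · rw [List.takeWhile_append, htw]
    simp
  · rw [List.dropWhile_append, h]
    simp

lemma pv_alt_ne_nil (a : Int) (t : List Int) : group_equal_alt (a :: t) ≠ [] := by
  rw [group_equal_alt]
  simp

lemma pv_step_cons (g : List Int) {rest : List (List Int)} (i : Int) (h : rest ≠ []) :
    pvStepA (g :: rest) i = g :: pvStepA rest i := by
  cases rest with
  | nil => exact absurd rfl h
  | cons b bs =>
    simp only [pvStepA, List.getLast?_cons_cons]
    cases hl : (b :: bs : List (List Int)).getLast? with
    | none => simp at hl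
    | some g' =>
      by_cases hh : g'.head? = some i <;> simp [hh, List.dropLast]

lemma pv_step_alt (p : List Int) : ∀ i : Int,
    pvStepA (group_equal_alt p) i = group_equal_alt (p ++ [i]) := by
  induction p using group_equal_alt.induct with
  | case1 => intro i; simp [group_equal_alt, pvStepA]
  | case2 a t ih =>
    intro i
    rw [group_equal_alt]
    by_cases hd : t.dropWhile (fun y => y == a) = []
    · rw [hd]
      have htw : t.takeWhile (fun y => y == a) = t := pv_tw_of_dw_nil hd
      by_cases hia : i = a
      · subst hia
        have h2 := pv_tw_dw_append_all (p := fun y => y == i) [i] hd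
        simp only [List.takeWhile_cons, List.dropWhile_cons, beq_self_eq_true,
          if_pos] at h2
        conv_rhs => rw [List.cons_append, group_equal_alt]
        simp [pvStepA, htw, h2.1, h2.2, group_equal_alt]
      · have hpi : ((fun y => y == a) i) = false := by simp [hia]
        have h2 := pv_tw_dw_append_all (p := fun y => y == a) [i] hd
        simp only [List.takeWhile_cons, List.dropWhile_cons, hpi] at h2
        conv_rhs => rw [List.cons_append, group_equal_alt]
        simp [pvStepA, htw, h2.1, h2.2, group_equal_alt, Ne.symm hia]
    · obtain ⟨h1, h2⟩ := pv_tw_dw_append (p := fun y => y == a) [i] hd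
      have hne : group_equal_alt (t.dropWhile (fun y => y == a)) ≠ [] := by
        cases hdc : t.dropWhile (fun y => y == a) with
        | nil => exact absurd hdc hd
        | cons b bs => exact pv_alt_ne_nil b bs
      rw [pv_step_cons _ i hne, ih]
      conv_rhs => rw [List.cons_append, group_equal_alt]
      rw [h1, h2]

lemma pv_foldl_alt : ∀ (x p : List Int),
    x.foldl pvStepA (group_equal_alt p) = group_equal_alt (p ++ x) := by
  intro x
  induction x with
  | nil => intro p; simp
  | cons i xs ih =>
    intro p
    rw [List.foldl_cons, pv_step_alt p i, ih (p ++ [i])]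
    simp

-- ===== VERDICT (by name: the statement is the Claim_ definition above) =====
theorem group_equal_spec : Claim_equal_group_equal := by
  intro x _
  unfold Spec_group_equal group_equal
  have := pv_foldl_alt x []
  simpa [group_equal_alt] using this
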